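-- pv_equiv track=rewrite | github.com/capitalrow/MinaProd | services/language_detection.py | _analyze_syntactic_patterns
-- ===== SOURCE A (Python) =====
-- from typing import Dict, List, Tuple, Optional, Any, Set
--
-- def _analyze_syntactic_patterns(text: str) -> Dict[str, float]:
--     """Analyze syntactic patterns."""
--     # Simple syntactic indicators
--     indicators = {}
--
--     # Article patterns (simplified)
--     articles = {
--         'english': ['the', 'a', 'an'],
--         'spanish': ['el', 'la', 'los', 'las', 'un', 'una'],
--         'french': ['le', 'la', 'les', 'un', 'une'],
--         'german': ['der', 'die', 'das', 'ein', 'eine']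
--     }
--
--     words = text.lower().split()
--     for lang, lang_articles in articles.items():
--         article_count = sum(words.count(article) for article in lang_articles)
--         indicators[f'{lang}_articles'] = article_count
--
--     return indicators
-- ===== SOURCE B (Python) =====
-- def _analyze_syntactic_patterns(text):
--     """Analyze syntactic patterns (inverted-index rewrite: one pass over the words)."""
--     index = {
--         'the': ['english'], 'a': ['english'], 'an': ['english'],
--         'el': ['spanish'], 'la': ['spanish', 'french'], 'los': ['spanish'],
--         'las': ['spanish'], 'un': ['spanish', 'french'], 'una': ['spanish'],
--         'le': ['french'], 'les': ['french'], 'une': ['french'],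
--         'der': ['german'], 'die': ['german'], 'das': ['german'],
--         'ein': ['german'], 'eine': ['german'],
--     }
--     counts = {'english': 0, 'spanish': 0, 'french': 0, 'german': 0}
--     for word in text.lower().split():
--         for lang in index.get(word, []):
--             counts[lang] += 1
--     return {f'{lang}_articles': n for lang, n in counts.items()}
-- ===== Notes on version B (the rewrite author's own statement) =====
-- stated objective: alternative
-- what changed: Replaced the per-language loop of 17 full words.count passes by a prebuilt inverted index (article -> languages) and a single pass over the word list that increments the counters of the languages each word maps to.
import Mathlib
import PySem

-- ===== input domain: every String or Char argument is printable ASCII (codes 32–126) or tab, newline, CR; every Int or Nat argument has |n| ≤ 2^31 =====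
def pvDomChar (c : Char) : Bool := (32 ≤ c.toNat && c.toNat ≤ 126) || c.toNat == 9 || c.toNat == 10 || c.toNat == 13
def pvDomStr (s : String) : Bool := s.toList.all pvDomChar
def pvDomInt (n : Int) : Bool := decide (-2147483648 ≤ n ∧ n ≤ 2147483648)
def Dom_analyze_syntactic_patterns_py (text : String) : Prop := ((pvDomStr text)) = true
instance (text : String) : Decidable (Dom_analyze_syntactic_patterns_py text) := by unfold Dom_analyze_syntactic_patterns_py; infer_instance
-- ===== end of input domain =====

-- B replaces A's 17 per-article `words.count` passes by one prebuilt inverted index (article → languages)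
-- and a single pass over the word list; objective: alternative (one word-pass instead of 17 count scans).

-- ===== PORT A =====
-- literal port of _analyze_syntactic_patterns: for each language, sum of words.count(article)
def analyze_syntactic_patterns_py (text : String) : List (String × Int) :=
  let articles : PySem.Dict String (List String) := PySem.Dict.ofList [
    ("english", ["the", "a", "an"]),
    ("spanish", ["el", "la", "los", "las", "un", "una"]),
    ("french", ["le", "la", "les", "un", "une"]),
    ("german", ["der", "die", "das", "ein", "eine"])]
  let words := PySem.Str.split₀ (PySem.Str.lower text)
  let indicators : PySem.Dict String Int :=
    articles.items.foldl (fun ind p =>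
      let article_count : Int :=
        p.2.foldl (fun acc article => acc + (PySem.List.count words article : Int)) 0
      ind.insert (p.1 ++ "_articles") article_count) PySem.Dict.empty
  indicators.items

-- ===== PORT B =====
-- the inverted index: article word → languages whose article list contains it
def pyIndex : PySem.Dict String (List String) := PySem.Dict.ofList [
  ("the", ["english"]), ("a", ["english"]), ("an", ["english"]),
  ("el", ["spanish"]), ("la", ["spanish", "french"]), ("los", ["spanish"]),
  ("las", ["spanish"]), ("un", ["spanish", "french"]), ("una", ["spanish"]),
  ("le", ["french"]), ("les", ["french"]), ("une", ["french"]),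
  ("der", ["german"]), ("die", ["german"]), ("das", ["german"]),
  ("ein", ["german"]), ("eine", ["german"])]

def analyze_syntactic_patterns_py_alt (text : String) : List (String × Int) :=
  let counts0 : PySem.Dict String Int :=
    PySem.Dict.ofList [("english", 0), ("spanish", 0), ("french", 0), ("german", 0)]
  let counts := (PySem.Str.split₀ (PySem.Str.lower text)).foldl
    (fun d w => (pyIndex.getD w []).foldl (fun d' lang => d'.modify lang 0 (· + 1)) d) counts0
  counts.items.map (fun p => (p.1 ++ "_articles", p.2))

-- ===== PRECONDITION & SPEC =====
def Spec_analyze_syntactic_patterns_py (text : String) (out : List (String × Int)) : Prop := out = analyze_syntactic_patterns_py_alt text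
instance (text : String) (out : List (String × Int)) : Decidable (Spec_analyze_syntactic_patterns_py text out) := by unfold Spec_analyze_syntactic_patterns_py; infer_instance

-- ===== CLAIM (what is proved, stated in full; the proofs are below) =====
def Claim_equal_analyze_syntactic_patterns_py : Prop := ∀ (text : String), Dom_analyze_syntactic_patterns_py text → Spec_analyze_syntactic_patterns_py text (analyze_syntactic_patterns_py text)

-- ===== LEMMAS AND PROOFS =====

-- proof helpers: the canonical shape of B's counter dict and B's per-word step
def mk4 (e s f g : Int) : PySem.Dict String Int :=
  PySem.Dict.ofList [("english", e), ("spanish", s), ("french", f), ("german", g)]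

def step (d : PySem.Dict String Int) (w : String) : PySem.Dict String Int :=
  (pyIndex.getD w []).foldl (fun d' lang => d'.modify lang 0 (· + 1)) d

-- per-language indicator of a single word
def de (w : String) : Int := ((if w = "the" then 1 else 0) + if w = "a" then 1 else 0) + if w = "an" then 1 else 0
def ds (w : String) : Int := ((((if w = "el" then 1 else 0) + if w = "la" then 1 else 0) + if w = "los" then 1 else 0) + (if w = "las" then 1 else 0) + if w = "un" then 1 else 0) + if w = "una" then 1 else 0
def df (w : String) : Int := (((if w = "le" then 1 else 0) + if w = "la" then 1 else 0) + (if w = "les" then 1 else 0) + if w = "un" then 1 else 0) + if w = "une" then 1 else 0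
def dg (w : String) : Int := (((if w = "der" then 1 else 0) + if w = "die" then 1 else 0) + (if w = "das" then 1 else 0) + if w = "ein" then 1 else 0) + if w = "eine" then 1 else 0

lemma getD_pyIndex_default (w : String) (h1 : w ≠ "the") (h2 : w ≠ "a") (h3 : w ≠ "an")
    (h4 : w ≠ "el") (h5 : w ≠ "la") (h6 : w ≠ "los") (h7 : w ≠ "las") (h8 : w ≠ "un")
    (h9 : w ≠ "una") (h10 : w ≠ "le") (h11 : w ≠ "les") (h12 : w ≠ "une") (h13 : w ≠ "der")
    (h14 : w ≠ "die") (h15 : w ≠ "das") (h16 : w ≠ "ein") (h17 : w ≠ "eine") :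
    pyIndex.getD w [] = [] := by
  have e : ∀ a : String, w ≠ a → (a == w) = false := fun a h => beq_eq_false_iff_ne.mpr (Ne.symm h)
  simp [pyIndex, PySem.Dict.getD, PySem.Dict.get?, PySem.Dict.ofList, PySem.Dict.empty,
    PySem.Dict.update, PySem.Dict.insert, List.find?,
    e _ h1, e _ h2, e _ h3, e _ h4, e _ h5, e _ h6, e _ h7, e _ h8, e _ h9, e _ h10,
    e _ h11, e _ h12, e _ h13, e _ h14, e _ h15, e _ h16, e _ h17]

lemma step_eq (w : String) (e s f g : Int) :
    step (mk4 e s f g) w = mk4 (e + de w) (s + ds w) (f + df w) (g + dg w) := by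
  by_cases h1 : w = "the"; · subst h1; simp [step, mk4, de, ds, df, dg]; rfl
  by_cases h2 : w = "a"; · subst h2; simp [step, mk4, de, ds, df, dg]; rfl
  by_cases h3 : w = "an"; · subst h3; simp [step, mk4, de, ds, df, dg]; rfl
  by_cases h4 : w = "el"; · subst h4; simp [step, mk4, de, ds, df, dg]; rfl
  by_cases h5 : w = "la"; · subst h5; simp [step, mk4, de, ds, df, dg]; rfl
  by_cases h6 : w = "los"; · subst h6; simp [step, mk4, de, ds, df, dg]; rfl
  by_cases h7 : w = "las"; · subst h7; simp [step, mk4, de, ds, df, dg]; rfl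
  by_cases h8 : w = "un"; · subst h8; simp [step, mk4, de, ds, df, dg]; rfl
  by_cases h9 : w = "una"; · subst h9; simp [step, mk4, de, ds, df, dg]; rfl
  by_cases h10 : w = "le"; · subst h10; simp [step, mk4, de, ds, df, dg]; rfl
  by_cases h11 : w = "les"; · subst h11; simp [step, mk4, de, ds, df, dg]; rfl
  by_cases h12 : w = "une"; · subst h12; simp [step, mk4, de, ds, df, dg]; rfl
  by_cases h13 : w = "der"; · subst h13; simp [step, mk4, de, ds, df, dg]; rfl
  by_cases h14 : w = "die"; · subst h14; simp [step, mk4, de, ds, df, dg]; rfl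
  by_cases h15 : w = "das"; · subst h15; simp [step, mk4, de, ds, df, dg]; rfl
  by_cases h16 : w = "ein"; · subst h16; simp [step, mk4, de, ds, df, dg]; rfl
  by_cases h17 : w = "eine"; · subst h17; simp [step, mk4, de, ds, df, dg]; rfl
  rw [step, getD_pyIndex_default w h1 h2 h3 h4 h5 h6 h7 h8 h9 h10 h11 h12 h13 h14 h15 h16 h17]
  simp [mk4, de, ds, df, dg, h1, h2, h3, h4, h5, h6, h7, h8, h9, h10, h11, h12, h13, h14, h15, h16, h17]

lemma fold_eq (ws : List String) (e s f g : Int) :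
    ws.foldl step (mk4 e s f g)
      = mk4 (e + (ws.map de).sum) (s + (ws.map ds).sum) (f + (ws.map df).sum) (g + (ws.map dg).sum) := by
  induction ws generalizing e s f g with
  | nil => simp
  | cons w ws ih =>
    rw [List.foldl_cons, step_eq, ih]
    simp [add_assoc]

-- a 0/1 indicator sum over the word list is a count
lemma sum_ind (ws : List String) (a : String) :
    (ws.map (fun w => if w = a then (1 : Int) else 0)).sum = (PySem.List.count ws a : Int) := by
  have h : (fun w => if w = a then (1 : Int) else 0) = (fun w => if (w == a) = true then (1 : Int) else 0) := by
    funext w; simp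
  rw [h, PySem.List.sum_map_ite_one_zero, PySem.List.count_eq, List.count]

lemma sum_de (ws : List String) : (ws.map de).sum
    = ((PySem.List.count ws "the" : Int) + PySem.List.count ws "a") + PySem.List.count ws "an" := by
  have h : de = fun w => (((if w = "the" then (1 : Int) else 0) + if w = "a" then 1 else 0) + if w = "an" then 1 else 0) := rfl
  rw [h]
  simp only [PySem.List.sum_map_add_int, sum_ind]

lemma sum_ds (ws : List String) : (ws.map ds).sum
    = ((((PySem.List.count ws "el" : Int) + PySem.List.count ws "la") + PySem.List.count ws "los")
        + (PySem.List.count ws "las" : Int) + PySem.List.count ws "un") + PySem.List.count ws "una" := by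
  have h : ds = fun w => ((((((if w = "el" then (1 : Int) else 0) + if w = "la" then 1 else 0) + if w = "los" then 1 else 0) + (if w = "las" then 1 else 0) + if w = "un" then 1 else 0) + if w = "una" then 1 else 0)) := rfl
  rw [h]
  simp only [PySem.List.sum_map_add_int, sum_ind]

lemma sum_df (ws : List String) : (ws.map df).sum
    = (((PySem.List.count ws "le" : Int) + PySem.List.count ws "la")
        + ((PySem.List.count ws "les" : Int) + PySem.List.count ws "un")) + PySem.List.count ws "une" := by
  have h : df = fun w => ((((if w = "le" then (1 : Int) else 0) + if w = "la" then 1 else 0) + (if w = "les" then 1 else 0) + if w = "un" then 1 else 0) + if w = "une" then 1 else 0) := rfl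
  rw [h]
  simp only [PySem.List.sum_map_add_int, sum_ind]
  ring

lemma sum_dg (ws : List String) : (ws.map dg).sum
    = (((PySem.List.count ws "der" : Int) + PySem.List.count ws "die")
        + ((PySem.List.count ws "das" : Int) + PySem.List.count ws "ein")) + PySem.List.count ws "eine" := by
  have h : dg = fun w => ((((if w = "der" then (1 : Int) else 0) + if w = "die" then 1 else 0) + (if w = "das" then 1 else 0) + if w = "ein" then 1 else 0) + if w = "eine" then 1 else 0) := rfl
  rw [h]
  simp only [PySem.List.sum_map_add_int, sum_ind]
  ring

-- ===== VERDICT (by name: the statement is the Claim_ definition above) =====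
theorem analyze_syntactic_patterns_py_spec : Claim_equal_analyze_syntactic_patterns_py := by
  intro text _
  unfold Spec_analyze_syntactic_patterns_py
  show analyze_syntactic_patterns_py text
      = ((PySem.Str.split₀ (PySem.Str.lower text)).foldl step (mk4 0 0 0 0)).items.map
          (fun p => (p.1 ++ "_articles", p.2))
  rw [fold_eq]
  show _ = [("english_articles", 0 + ((PySem.Str.split₀ (PySem.Str.lower text)).map de).sum),
            ("spanish_articles", 0 + ((PySem.Str.split₀ (PySem.Str.lower text)).map ds).sum),
            ("french_articles", 0 + ((PySem.Str.split₀ (PySem.Str.lower text)).map df).sum),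
            ("german_articles", 0 + ((PySem.Str.split₀ (PySem.Str.lower text)).map dg).sum)]
  rw [sum_de, sum_ds, sum_df, sum_dg]
  show [("english_articles", _), ("spanish_articles", _), ("french_articles", _), ("german_articles", _)] = _
  simp only [List.foldl_cons, List.foldl_nil, List.cons.injEq, Prod.mk.injEq]
  exact ⟨⟨trivial, by ring⟩, ⟨trivial, by ring⟩, ⟨trivial, by ring⟩, ⟨trivial, by ring⟩, trivial⟩
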